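-- pv_equiv track=rewrite | github.com/defeo/ss-isogeny-software | paths.py | _h4
-- ===== SOURCE A (Python) =====
-- def _h4(n):
--     """
--     Utility function on bitfields.
--     """
--     res = 0
--     i = 1
--     while n > 0:
--         if n & 3 != 0:
--             res |= i
--         i <<= 1
--         n >>= 2
--
--     return res
-- ===== SOURCE B (Python) =====
-- _TAB = [0, 1, 1, 1, 2, 3, 3, 3, 2, 3, 3, 3, 2, 3, 3, 3]
--
-- def _h4(n):
--     """
--     Utility function on bitfields.
--     """
--     res = 0
--     sh = 0
--     while n > 0:
--         res |= _TAB[n & 15] << sh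
--         sh += 2
--         n >>= 4
--     return res
-- ===== Notes on version B (the rewrite author's own statement) =====
-- stated objective: alternative
-- what changed: B replaces the per-group test-and-mask loop with a precomputed sixteen-entry lookup table that compresses two base-4 digits per loop iteration, halving the number of iterations and eliminating the branch on each group.
import Mathlib
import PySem

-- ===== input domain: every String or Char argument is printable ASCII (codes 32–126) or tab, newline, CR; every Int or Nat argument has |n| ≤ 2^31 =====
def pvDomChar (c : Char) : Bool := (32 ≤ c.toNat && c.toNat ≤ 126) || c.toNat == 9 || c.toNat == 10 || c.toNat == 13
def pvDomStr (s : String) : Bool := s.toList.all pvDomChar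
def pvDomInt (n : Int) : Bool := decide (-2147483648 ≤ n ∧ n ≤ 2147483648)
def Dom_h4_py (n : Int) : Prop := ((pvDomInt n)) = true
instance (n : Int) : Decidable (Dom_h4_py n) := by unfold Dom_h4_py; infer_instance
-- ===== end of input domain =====

-- B is table-driven: a precomputed sixteen-entry lookup table compresses two base-4 digits per
-- loop iteration (half the iterations, no per-group test); same result, alternative structure.

-- ===== PORT A =====
-- while n > 0: if n & 3: res |= i; i <<= 1; n >>= 2
def h4Loop (n res i : Int) : Int :=
  if _h : 0 < n then
    h4Loop (n >>> (2:Nat)) (if PySem.Int.band n 3 ≠ 0 then PySem.Int.bor res i else res) (i <<< (1:Nat))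
  else res
termination_by n.toNat
decreasing_by
  have : n >>> (2:Nat) = n / 4 := by rw [Int.shiftRight_eq_div_pow]; norm_num
  rw [this]; omega

def h4_py (n : Int) : Int := h4Loop n 0 1

-- ===== PORT B =====
-- _TAB = [0,1,1,1, 2,3,3,3, 2,3,3,3, 2,3,3,3]
def h4Tab : List Int := [0, 1, 1, 1, 2, 3, 3, 3, 2, 3, 3, 3, 2, 3, 3, 3]

-- while n > 0: res |= _TAB[n & 15] << sh; sh += 2; n >>= 4
-- (inside the loop n > 0, so the index n & 15 is always in range 0..15; .getD 0 never fires)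
def h4AltLoop (n res : Int) (sh : Nat) : Int :=
  if _h : 0 < n then
    h4AltLoop (n >>> (4:Nat))
      (PySem.Int.bor res (((PySem.List.pyGet? h4Tab (PySem.Int.band n 15)).getD 0) <<< sh))
      (sh + 2)
  else res
termination_by n.toNat
decreasing_by
  have : n >>> (4:Nat) = n / 16 := by rw [Int.shiftRight_eq_div_pow]; norm_num
  rw [this]; omega

def h4_py_alt (n : Int) : Int := h4AltLoop n 0 0

-- ===== PRECONDITION & SPEC =====
def Spec_h4_py (n : Int) (out : Int) : Prop := out = h4_py_alt n
instance (n : Int) (out : Int) : Decidable (Spec_h4_py n out) := by unfold Spec_h4_py; infer_instance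

-- ===== CLAIM (what is proved, stated in full; the proofs are below) =====
def Claim_equal_h4_py : Prop := ∀ (n : Int), Dom_h4_py n → Spec_h4_py n (h4_py n)

-- ===== LEMMAS AND PROOFS =====

-- canonical value, in per-group recursion shape: group 0 of n plus twice the value of n >> 2
def Hspec (n : Int) : Int :=
  if h : 0 < n then (if PySem.Int.band n 3 ≠ 0 then 1 else 0) + 2 * Hspec (n >>> (2:Nat)) else 0
termination_by n.toNat
decreasing_by
  have : n >>> (2:Nat) = n / 4 := by rw [Int.shiftRight_eq_div_pow]; norm_num
  rw [this]; omega

-- disjoint-or as addition: a < 2^sh means a's bits and (b · 2^sh)'s bits do not overlap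
theorem lor_shift_nat (sh : Nat) : ∀ a b : Nat, a < 2^sh → a ||| (b * 2^sh) = a + b * 2^sh := by
  induction sh with
  | zero =>
    intro a b h
    interval_cases a
    simp
  | succ sh ih =>
    intro a b h
    have hq : a/2 < 2^sh := by
      have : 2^(sh+1) = 2*2^sh := by ring
      omega
    have hb2 : Nat.bit false (b * 2^sh) = b * 2^(sh+1) := by
      simp [Nat.bit]; ring
    have key : Nat.bit (decide (a % 2 = 1)) (a/2) = a := by
      rcases (by omega : a % 2 = 0 ∨ a % 2 = 1) with hr | hr <;> simp [Nat.bit, hr] <;> omega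
    calc a ||| (b * 2^(sh+1)) = Nat.bit (decide (a % 2 = 1)) (a/2) ||| Nat.bit false (b * 2^sh) := by
          rw [key, hb2]
      _ = Nat.bit (decide (a % 2 = 1) || false) ((a/2) ||| (b * 2^sh)) := Nat.lor_bit _ _ _ _
      _ = a + b * 2^(sh+1) := by
          rw [ih _ b hq]
          have hp2 : b * 2^(sh+1) = 2 * (b * 2^sh) := by ring
          rcases (by omega : a % 2 = 0 ∨ a % 2 = 1) with hr | hr <;>
            simp [Nat.bit, hr] <;> omega

theorem bor_shift_int (sh : Nat) (a b : Int) (h0 : 0 ≤ a) (hb : 0 ≤ b) (h : a < 2^sh) :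
    PySem.Int.bor a (b <<< sh) = a + b * 2^sh := by
  have hsl : b <<< sh = b * 2^sh := by rw [Int.shiftLeft_eq]
  have hp : (0:Int) ≤ 2^sh := by positivity
  have hbs : (0:Int) ≤ b * 2^sh := by positivity
  rw [hsl, PySem.Int.bor_of_nonneg h0 hbs]
  have hpn : ((2:Int)^sh).toNat = 2^sh := by
    have : ((2:Int)^sh) = ((2^sh : ℕ) : Int) := by push_cast; ring
    omega
  have h1 := Int.toNat_mul hb hp
  rw [hpn] at h1
  have h2 : a.toNat < 2^sh := by omega
  rw [h1, lor_shift_nat sh a.toNat b.toNat h2]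
  push_cast [Int.toNat_of_nonneg h0, Int.toNat_of_nonneg hb]
  ring

theorem h4Loop_eq (fuel : Nat) : ∀ (n res : Int) (j : Nat), n.toNat ≤ fuel → 0 ≤ res → res < 2^j →
    h4Loop n res (2^j) = res + 2^j * Hspec n := by
  induction fuel with
  | zero =>
    intro n res j hf h0 hj
    rw [h4Loop, Hspec]
    have : ¬ 0 < n := by omega
    rw [dif_neg this, dif_neg this]; ring
  | succ fuel ih =>
    intro n res j hf h0 hj
    rw [h4Loop, Hspec]
    by_cases h : 0 < n
    · rw [dif_pos h, dif_pos h]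
      have hdiv : n >>> (2:Nat) = n / 4 := by rw [Int.shiftRight_eq_div_pow]; norm_num
      have hfuel : (n >>> (2:Nat)).toNat ≤ fuel := by rw [hdiv]; omega
      have hsl : (2:Int)^j <<< (1:Nat) = 2^(j+1) := by rw [Int.shiftLeft_eq]; ring
      have hpow : (0:Int) < 2^j := by positivity
      have hbor : PySem.Int.bor res (2^j) = res + 2^j := by
        have := bor_shift_int j res 1 h0 (by norm_num) hj
        rw [Int.shiftLeft_eq] at this
        simpa using this
      by_cases hb : PySem.Int.band n 3 ≠ 0
      · rw [if_pos hb, if_pos hb, hbor, hsl,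
          ih (n >>> (2:Nat)) (res + 2^j) (j+1) hfuel (by omega) (by rw [pow_succ]; omega)]
        ring
      · rw [if_neg hb, if_neg hb, hsl,
          ih (n >>> (2:Nat)) res (j+1) hfuel h0 (by rw [pow_succ]; omega)]
        ring
    · rw [dif_neg h, dif_neg h]; ring

-- the table entry at m &&& 15 is exactly (group0 ≠ 0) + 2·(group1 ≠ 0) of the Nat m
theorem tab_entry (m : Nat) :
    (PySem.List.pyGet? h4Tab ((m &&& 15 : Nat) : Int)).getD 0
      = (if ((m % 4 : Nat) : Int) ≠ 0 then 1 else 0)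
        + 2 * (if ((m / 4 % 4 : Nat) : Int) ≠ 0 then 1 else 0) := by
  have h16 : m &&& 15 = m % 16 := Nat.and_two_pow_sub_one_eq_mod m 4
  have hm4 : m % 4 = m % 16 % 4 := by omega
  have hm44 : m / 4 % 4 = m % 16 / 4 := by omega
  rw [h16, hm4, hm44]
  have hc : m % 16 < 16 := by omega
  interval_cases (m % 16) <;> decide

-- two-step unfolding of Hspec: one table chunk (two groups) at a time
theorem hspec_two (n : Int) (h0 : 0 ≤ n) :
    Hspec n = ((if PySem.Int.band n 3 ≠ 0 then 1 else 0)
        + 2 * (if PySem.Int.band (n >>> (2:Nat)) 3 ≠ 0 then 1 else 0))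
        + 4 * Hspec (n >>> (4:Nat)) := by
  by_cases h : 0 < n
  · rw [Hspec, dif_pos h]
    have h2 : (0:Int) ≤ n >>> (2:Nat) := by
      rw [Int.shiftRight_eq_div_pow]; positivity
    by_cases h' : 0 < n >>> (2:Nat)
    · rw [Hspec, dif_pos h', Int.shiftRight_add n 2 2]
      ring
    · have hz : n >>> (2:Nat) = 0 := by omega
      have h4z : n >>> (4:Nat) = 0 := by
        rw [show (4:Nat) = 2 + 2 from rfl, Int.shiftRight_add, hz]
        decide
      rw [Hspec, dif_neg h', hz, h4z]
      have hb0 : PySem.Int.band 0 3 = 0 := by decide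
      rw [hb0, Hspec]
      norm_num
  · have hz : n = 0 := by omega
    subst hz
    have h0' : Hspec 0 = 0 := by rw [Hspec]; norm_num
    have hs2 : (0:Int) >>> (2:Nat) = 0 := by decide
    have hs4 : (0:Int) >>> (4:Nat) = 0 := by decide
    simp [h0', hs2, hs4, show PySem.Int.band 0 3 = 0 from by decide]

theorem h4AltLoop_eq (fuel : Nat) : ∀ (n res : Int) (sh : Nat), n.toNat ≤ fuel → 0 ≤ res → res < 2^sh →
    h4AltLoop n res sh = res + 2^sh * Hspec n := by
  induction fuel with
  | zero =>
    intro n res sh hf h0 hsh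
    rw [h4AltLoop, Hspec]
    have : ¬ 0 < n := by omega
    rw [dif_neg this, dif_neg this]; ring
  | succ fuel ih =>
    intro n res sh hf h0 hsh
    rw [h4AltLoop]
    by_cases h : 0 < n
    · rw [dif_pos h]
      have hn0 : (0:Int) ≤ n := by omega
      -- the table entry, rewritten via the Nat view m = n.toNat
      have hand3 : ∀ m : Nat, m &&& 3 = m % 4 := by
        intro m
        have h := Nat.and_two_pow_sub_one_eq_mod m 2
        norm_num at h
        exact h
      have hband15 : PySem.Int.band n 15 = ((n.toNat &&& 15 : Nat) : Int) := by
        rw [PySem.Int.band_of_nonneg hn0 (by norm_num)]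
        rfl
      have hband3 : PySem.Int.band n 3 = ((n.toNat % 4 : Nat) : Int) := by
        rw [PySem.Int.band_of_nonneg hn0 (by norm_num)]
        congr 1
        exact hand3 n.toNat
      have hsr2 : n >>> (2:Nat) = ((n.toNat / 4 : Nat) : Int) := by
        rw [Int.shiftRight_eq_div_pow]
        norm_num
        omega
      have hband3' : PySem.Int.band (n >>> (2:Nat)) 3 = ((n.toNat / 4 % 4 : Nat) : Int) := by
        rw [hsr2, PySem.Int.band_of_nonneg (by positivity) (by norm_num)]
        congr 1
        rw [show (((n.toNat / 4 : Nat) : Int)).toNat = n.toNat / 4 by omega]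
        exact hand3 _
      set t : Int := (PySem.List.pyGet? h4Tab (PySem.Int.band n 15)).getD 0 with ht
      have htval : t = (if PySem.Int.band n 3 ≠ 0 then 1 else 0)
          + 2 * (if PySem.Int.band (n >>> (2:Nat)) 3 ≠ 0 then 1 else 0) := by
        rw [ht, hband15, hband3, hband3', tab_entry n.toNat]
      have ht0 : 0 ≤ t := by rw [htval]; split_ifs <;> norm_num
      have ht3 : t ≤ 3 := by rw [htval]; split_ifs <;> norm_num
      have hbor : PySem.Int.bor res (t <<< sh) = res + t * 2^sh :=
        bor_shift_int sh res t h0 ht0 hsh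
      have hdiv : n >>> (4:Nat) = n / 16 := by rw [Int.shiftRight_eq_div_pow]; norm_num
      have hfuel : (n >>> (4:Nat)).toNat ≤ fuel := by rw [hdiv]; omega
      have hpow : (0:Int) < 2^sh := by positivity
      have hres' : res + t * 2^sh < 2^(sh+2) := by
        have : (2:Int)^(sh+2) = 4 * 2^sh := by ring
        nlinarith
      rw [hbor, ih (n >>> (4:Nat)) (res + t * 2^sh) (sh+2) hfuel (by nlinarith) hres',
        hspec_two n hn0, ← htval]
      ring
    · rw [dif_neg h, Hspec, dif_neg h]; ring

-- ===== VERDICT (by name: the statement is the Claim_ definition above) =====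
theorem h4_py_spec : Claim_equal_h4_py := by
  intro n _
  unfold Spec_h4_py h4_py h4_py_alt
  have hA := h4Loop_eq n.toNat n 0 0 (le_refl _) (le_refl _) (by norm_num)
  have hB := h4AltLoop_eq n.toNat n 0 0 (le_refl _) (le_refl _) (by norm_num)
  simp only [pow_zero] at hA hB
  rw [hA, hB]
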